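-- pv_equiv track=rewrite | github.com/vikasjangidmk/GMI-TASK | parse_with_LLM.py | fix_ocr_text
-- ===== SOURCE A (Python) =====
-- def fix_ocr_text(text):
--     corrections = {
--         'O': '0', 'o': '0',
--         'l': '1', 'I': '1',
--         ',': '.', '|': ''
--     }
--     for wrong, right in corrections.items():
--         text = text.replace(wrong, right)
--     return text.strip()
-- ===== SOURCE B (Python) =====
-- def fix_ocr_text(text):
--     out = []
--     for ch in text:
--         if ch == 'O' or ch == 'o':
--             out.append('0')
--         elif ch == 'l' or ch == 'I':
--             out.append('1')
--         elif ch == ',':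
--             out.append('.')
--         elif ch == '|':
--             pass
--         else:
--             out.append(ch)
--     return ''.join(out).strip()
-- ===== Notes on version B (the rewrite author's own statement) =====
-- stated objective: alternative
-- what changed: B drops the corrections dict entirely and does a single explicit pass over the characters with an if/elif chain and an output accumulator, instead of A's six sequential whole-string replace scans driven by a dict.
import Mathlib
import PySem

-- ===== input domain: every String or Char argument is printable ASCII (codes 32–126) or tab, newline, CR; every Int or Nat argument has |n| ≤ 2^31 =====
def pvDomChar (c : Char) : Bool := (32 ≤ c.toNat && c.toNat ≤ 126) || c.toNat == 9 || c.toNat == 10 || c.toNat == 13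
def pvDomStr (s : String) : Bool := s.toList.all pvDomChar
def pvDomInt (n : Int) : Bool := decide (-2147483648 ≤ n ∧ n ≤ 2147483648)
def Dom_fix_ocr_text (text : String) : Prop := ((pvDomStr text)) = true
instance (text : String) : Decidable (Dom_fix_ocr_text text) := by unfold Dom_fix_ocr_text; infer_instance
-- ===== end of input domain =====

-- B drops the corrections dict and does one explicit pass over the characters with an
-- if/elif chain and an accumulator, instead of A's six sequential whole-string replace scans.

-- ===== PORT A =====
def fix_ocr_text (text : String) : String :=
  let corrections : PySem.Dict String String :=
    PySem.Dict.mk [("O","0"),("o","0"),("l","1"),("I","1"),(",","."),("|","")]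
  let text := corrections.items.foldl
    (fun t (p : String × String) => PySem.Str.replace t p.1 p.2) text
  PySem.Str.strip text

-- ===== PORT B =====
-- one character of Source B's if/elif chain
def fixChars : List Char → List Char
  | [] => []
  | c :: t =>
    if c = 'O' ∨ c = 'o' then '0' :: fixChars t
    else if c = 'l' ∨ c = 'I' then '1' :: fixChars t
    else if c = ',' then '.' :: fixChars t
    else if c = '|' then fixChars t
    else c :: fixChars t

def fix_ocr_text_alt (text : String) : String :=
  PySem.Str.strip (String.ofList (fixChars text.toList))

-- ===== PRECONDITION & SPEC =====
def Spec_fix_ocr_text (text : String) (out : String) : Prop := out = fix_ocr_text_alt text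
instance (text : String) (out : String) : Decidable (Spec_fix_ocr_text text out) := by unfold Spec_fix_ocr_text; infer_instance

-- ===== CLAIM (what is proved, stated in full; the proofs are below) =====
def Claim_equal_fix_ocr_text : Prop := ∀ (text : String), Dom_fix_ocr_text text → Spec_fix_ocr_text text (fix_ocr_text text)

-- ===== LEMMAS AND PROOFS =====
theorem go_single (w : Char) (r : List Char) :
    ∀ (cs : List Char) (fuel : Nat) (acc : List Char), cs.length ≤ fuel →
      PySem.Chars.replace.go [w] r fuel cs acc
        = acc.reverse ++ cs.flatMap (fun c => if c = w then r else [c]) := by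
  intro cs
  induction cs with
  | nil =>
    intro fuel acc _
    cases fuel <;> simp [PySem.Chars.replace.go]
  | cons c t ih =>
    intro fuel acc hle
    cases fuel with
    | zero => simp at hle
    | succ f =>
      by_cases hc : c = w
      · subst hc
        have h1 : PySem.Chars.replace.go [c] r (f+1) (c::t) acc
            = PySem.Chars.replace.go [c] r f t (r.reverse ++ acc) := by
          simp [PySem.Chars.replace.go, List.isPrefixOf]
        rw [h1, ih f _ (by simpa using hle)]
        simp
      · have h1 : PySem.Chars.replace.go [w] r (f+1) (c::t) acc
            = PySem.Chars.replace.go [w] r f t (c :: acc) := by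
          simp [PySem.Chars.replace.go, List.isPrefixOf, Ne.symm hc]
        rw [h1, ih f _ (by simpa using hle)]
        simp [hc]

theorem replace_single (cs : List Char) (w : Char) (r : List Char) :
    PySem.Chars.replace cs [w] r = cs.flatMap (fun c => if c = w then r else [c]) := by
  simpa [PySem.Chars.replace] using go_single w r cs cs.length [] le_rfl

theorem charmap_eq (c : Char) :
    (List.flatMap (fun x =>
        List.flatMap (fun x =>
            List.flatMap (fun x =>
                List.flatMap (fun x =>
                    List.flatMap (fun c => if c = '|' then [] else [c])
                      (if x = ',' then ".".toList else [x]))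
                  (if x = 'I' then "1".toList else [x]))
              (if x = 'l' then "1".toList else [x]))
          (if x = 'o' then "0".toList else [x]))
      (if c = 'O' then "0".toList else [c]))
    = (if c = 'O' ∨ c = 'o' then ['0']
       else if c = 'l' ∨ c = 'I' then ['1']
       else if c = ',' then ['.']
       else if c = '|' then []
       else [c]) := by
  by_cases h1 : c = 'O'
  · subst h1; decide
  by_cases h2 : c = 'o'
  · subst h2; decide
  by_cases h3 : c = 'l'
  · subst h3; decide
  by_cases h4 : c = 'I'
  · subst h4; decide
  by_cases h5 : c = ','
  · subst h5; decide
  by_cases h6 : c = '|'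
  · subst h6; decide
  simp [h1, h2, h3, h4, h5, h6]

theorem fixChars_flatMap (cs : List Char) :
    fixChars cs = cs.flatMap (fun c =>
      if c = 'O' ∨ c = 'o' then ['0']
      else if c = 'l' ∨ c = 'I' then ['1']
      else if c = ',' then ['.']
      else if c = '|' then []
      else [c]) := by
  induction cs with
  | nil => rfl
  | cons c t ih =>
    simp only [fixChars, List.flatMap_cons, ih]
    split_ifs <;> simp

-- ===== VERDICT =====

theorem fix_ocr_text_spec : Claim_equal_fix_ocr_text := by
  intro text _
  unfold Spec_fix_ocr_text fix_ocr_text fix_ocr_text_alt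
  apply String.toList_injective
  simp only [List.foldl_cons, List.foldl_nil, PySem.Str.toList_strip, PySem.Str.toList_replace]
  congr 1
  rw [show (String.ofList (fixChars text.toList)).toList = fixChars text.toList by simp]
  rw [show ("O":String).toList = ['O'] from rfl, show ("o":String).toList = ['o'] from rfl,
    show ("l":String).toList = ['l'] from rfl, show ("I":String).toList = ['I'] from rfl,
    show (",":String).toList = [','] from rfl, show ("|":String).toList = ['|'] from rfl]
  simp only [replace_single, List.flatMap_assoc]
  rw [fixChars_flatMap]
  exact List.flatMap_congr (fun c _ => charmap_eq c)
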